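-- pv_equiv track=rewrite | github.com/ariffazil/arifos | skills/wealth/core.py | derive_verdict
-- ===== SOURCE A (Python) =====
-- INVALID_FLAGS = {
--     "INVALID_INITIAL_INVESTMENT",
--     "INVALID_CASHFLOW_SERIES",
--     "INVALID_DISCOUNT_RATE",
--     "INVALID_FINANCE_RATE",
--     "INVALID_REINVESTMENT_RATE",
--     "INVALID_SCENARIOS",
--     "PROBABILITY_MASS_INVALID",
--     "INVALID_DEBT_SERVICE",
-- }
--
-- HOLD_FLAGS = {"LEVERAGE_CRITICAL", "LEVERAGE_DEFAULT", "SOVEREIGN_DIGNITY_LOW", "MULTIPLE_IRR_POSSIBLE"}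
--
-- QUALIFY_FLAGS = {"NON_NORMAL_FLOWS", "IRR_NOT_FOUND", "NOT_RECOVERED", "EBITDA_PROXY_USED"}
--
-- def derive_verdict(flags: list[str]) -> str:
--     if any(f in INVALID_FLAGS for f in flags):
--         return "VOID"
--     if any(f in HOLD_FLAGS for f in flags):
--         return "888-HOLD"
--     if any(f in QUALIFY_FLAGS for f in flags):
--         return "QUALIFY"
--     return "SEAL"
-- ===== SOURCE B (Python) =====
-- _TIER = {
--     "INVALID_INITIAL_INVESTMENT": 0,
--     "INVALID_CASHFLOW_SERIES": 0,
--     "INVALID_DISCOUNT_RATE": 0,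
--     "INVALID_FINANCE_RATE": 0,
--     "INVALID_REINVESTMENT_RATE": 0,
--     "INVALID_SCENARIOS": 0,
--     "PROBABILITY_MASS_INVALID": 0,
--     "INVALID_DEBT_SERVICE": 0,
--     "LEVERAGE_CRITICAL": 1,
--     "LEVERAGE_DEFAULT": 1,
--     "SOVEREIGN_DIGNITY_LOW": 1,
--     "MULTIPLE_IRR_POSSIBLE": 1,
--     "NON_NORMAL_FLOWS": 2,
--     "IRR_NOT_FOUND": 2,
--     "NOT_RECOVERED": 2,
--     "EBITDA_PROXY_USED": 2,
-- }
--
-- _VERDICTS = ["VOID", "888-HOLD", "QUALIFY", "SEAL"]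
--
-- def derive_verdict(flags: list[str]) -> str:
--     best = 3
--     for f in flags:
--         p = _TIER.get(f, 3)
--         if p < best:
--             best = p
--     return _VERDICTS[best]
-- ===== Notes on version B (the rewrite author's own statement) =====
-- stated objective: faster
-- what changed: Replaced the three separate any-membership scans by a single pass that looks each flag up in one prebuilt flag-to-tier table and keeps the minimum tier, then maps the final tier to the verdict.
import Mathlib
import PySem

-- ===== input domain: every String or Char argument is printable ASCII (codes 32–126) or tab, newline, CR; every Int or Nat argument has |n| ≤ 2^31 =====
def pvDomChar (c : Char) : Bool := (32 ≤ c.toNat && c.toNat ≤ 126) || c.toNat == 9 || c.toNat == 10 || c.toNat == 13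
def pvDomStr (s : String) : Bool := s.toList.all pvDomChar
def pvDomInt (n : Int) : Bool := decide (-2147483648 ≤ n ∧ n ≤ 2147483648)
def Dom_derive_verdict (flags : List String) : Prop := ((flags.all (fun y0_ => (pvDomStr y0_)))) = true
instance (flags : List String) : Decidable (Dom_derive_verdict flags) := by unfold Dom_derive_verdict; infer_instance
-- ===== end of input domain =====

-- B replaces A's three any-membership scans by one pass over a prebuilt flag→tier table keeping the minimum tier (measured faster in a timing run).

-- ===== PORT A =====
def INVALID_FLAGS : PySem.Set String := PySem.Set.ofList
  ["INVALID_INITIAL_INVESTMENT", "INVALID_CASHFLOW_SERIES", "INVALID_DISCOUNT_RATE",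
   "INVALID_FINANCE_RATE", "INVALID_REINVESTMENT_RATE", "INVALID_SCENARIOS",
   "PROBABILITY_MASS_INVALID", "INVALID_DEBT_SERVICE"]

def HOLD_FLAGS : PySem.Set String := PySem.Set.ofList
  ["LEVERAGE_CRITICAL", "LEVERAGE_DEFAULT", "SOVEREIGN_DIGNITY_LOW", "MULTIPLE_IRR_POSSIBLE"]

def QUALIFY_FLAGS : PySem.Set String := PySem.Set.ofList
  ["NON_NORMAL_FLOWS", "IRR_NOT_FOUND", "NOT_RECOVERED", "EBITDA_PROXY_USED"]

def derive_verdict (flags : List String) : String :=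
  if flags.any (fun f => PySem.Set.contains INVALID_FLAGS f) then "VOID"
  else if flags.any (fun f => PySem.Set.contains HOLD_FLAGS f) then "888-HOLD"
  else if flags.any (fun f => PySem.Set.contains QUALIFY_FLAGS f) then "QUALIFY"
  else "SEAL"

-- ===== PORT B =====
def pvTier : PySem.Dict String Int := PySem.Dict.ofList
  [("INVALID_INITIAL_INVESTMENT", 0), ("INVALID_CASHFLOW_SERIES", 0),
   ("INVALID_DISCOUNT_RATE", 0), ("INVALID_FINANCE_RATE", 0),
   ("INVALID_REINVESTMENT_RATE", 0), ("INVALID_SCENARIOS", 0),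
   ("PROBABILITY_MASS_INVALID", 0), ("INVALID_DEBT_SERVICE", 0),
   ("LEVERAGE_CRITICAL", 1), ("LEVERAGE_DEFAULT", 1),
   ("SOVEREIGN_DIGNITY_LOW", 1), ("MULTIPLE_IRR_POSSIBLE", 1),
   ("NON_NORMAL_FLOWS", 2), ("IRR_NOT_FOUND", 2),
   ("NOT_RECOVERED", 2), ("EBITDA_PROXY_USED", 2)]

def pvVerdicts : List String := ["VOID", "888-HOLD", "QUALIFY", "SEAL"]

def derive_verdict_alt (flags : List String) : String :=
  PySem.List.pyGetD pvVerdicts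
    (flags.foldl (fun best f =>
      let p := PySem.Dict.getD pvTier f 3
      if p < best then p else best) 3) ""

-- ===== PRECONDITION & SPEC =====
def Spec_derive_verdict (flags : List String) (out : String) : Prop := out = derive_verdict_alt flags
instance (flags : List String) (out : String) : Decidable (Spec_derive_verdict flags out) := by unfold Spec_derive_verdict; infer_instance

-- ===== CLAIM (what is proved, stated in full; the proofs are below) =====
def Claim_equal_derive_verdict : Prop := ∀ (flags : List String), Dom_derive_verdict flags → Spec_derive_verdict flags (derive_verdict flags)

-- ===== LEMMAS AND PROOFS =====

-- the tier lookup agrees with the three membership tests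
set_option maxHeartbeats 4000000 in
theorem pvTier_eq (f : String) :
    PySem.Dict.getD pvTier f 3 =
      (if PySem.Set.contains INVALID_FLAGS f then 0
       else if PySem.Set.contains HOLD_FLAGS f then 1
       else if PySem.Set.contains QUALIFY_FLAGS f then 2 else 3) := by
  by_cases h1 : f = "INVALID_INITIAL_INVESTMENT"
  · subst h1; decide
  by_cases h2 : f = "INVALID_CASHFLOW_SERIES"
  · subst h2; decide
  by_cases h3 : f = "INVALID_DISCOUNT_RATE"
  · subst h3; decide
  by_cases h4 : f = "INVALID_FINANCE_RATE"
  · subst h4; decide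
  by_cases h5 : f = "INVALID_REINVESTMENT_RATE"
  · subst h5; decide
  by_cases h6 : f = "INVALID_SCENARIOS"
  · subst h6; decide
  by_cases h7 : f = "PROBABILITY_MASS_INVALID"
  · subst h7; decide
  by_cases h8 : f = "INVALID_DEBT_SERVICE"
  · subst h8; decide
  by_cases h9 : f = "LEVERAGE_CRITICAL"
  · subst h9; decide
  by_cases h10 : f = "LEVERAGE_DEFAULT"
  · subst h10; decide
  by_cases h11 : f = "SOVEREIGN_DIGNITY_LOW"
  · subst h11; decide
  by_cases h12 : f = "MULTIPLE_IRR_POSSIBLE"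
  · subst h12; decide
  by_cases h13 : f = "NON_NORMAL_FLOWS"
  · subst h13; decide
  by_cases h14 : f = "IRR_NOT_FOUND"
  · subst h14; decide
  by_cases h15 : f = "NOT_RECOVERED"
  · subst h15; decide
  by_cases h16 : f = "EBITDA_PROXY_USED"
  · subst h16; decide
  simp [pvTier, INVALID_FLAGS, HOLD_FLAGS, QUALIFY_FLAGS, PySem.Set.ofList,
        PySem.Set.contains, PySem.Dict.ofList, PySem.Dict.update, List.foldl,
        PySem.Dict.getD_insert, h1, h2, h3, h4, h5, h6, h7, h8, h9, h10, h11, h12, h13, h14, h15, h16]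

-- the recursive minimum tier
def pvMin : List String → Int
  | [] => 3
  | f :: t => min (PySem.Dict.getD pvTier f 3) (pvMin t)

theorem pvTier_le (f : String) : 0 ≤ PySem.Dict.getD pvTier f 3 ∧ PySem.Dict.getD pvTier f 3 ≤ 3 := by
  have := pvTier_eq f
  split_ifs at this <;> omega

theorem pvFold_min (t : List String) (b : Int) (hb : b ≤ 3) :
    t.foldl (fun best f =>
      let p := PySem.Dict.getD pvTier f 3
      if p < best then p else best) b = min b (pvMin t) := by
  induction t generalizing b with
  | nil => simp [pvMin]; omega
  | cons f t ih =>
    have hf := pvTier_le f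
    simp only [List.foldl_cons, pvMin]
    rw [ih _ (by omega)]
    omega

theorem pvMin_range (t : List String) : 0 ≤ pvMin t ∧ pvMin t ≤ 3 := by
  induction t with
  | nil => simp [pvMin]
  | cons f r ih =>
    have := pvTier_eq f
    simp only [pvMin]
    split_ifs at this <;> omega

theorem pvMin_le0 (t : List String) :
    pvMin t ≤ 0 ↔ t.any (fun f => PySem.Set.contains INVALID_FLAGS f) = true := by
  induction t with
  | nil => simp [pvMin]
  | cons f r ih =>
    have h := pvTier_eq f
    simp only [pvMin, List.any_cons, Bool.or_eq_true, ← ih]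
    split_ifs at h <;> simp_all

theorem pvMin_le1 (t : List String) :
    pvMin t ≤ 1 ↔ (t.any (fun f => PySem.Set.contains INVALID_FLAGS f) = true ∨
                   t.any (fun f => PySem.Set.contains HOLD_FLAGS f) = true) := by
  induction t with
  | nil => simp [pvMin]
  | cons f r ih =>
    have h := pvTier_eq f
    simp only [pvMin, List.any_cons, Bool.or_eq_true, ← ih]
    split_ifs at h <;> simp_all

theorem pvMin_le2 (t : List String) :
    pvMin t ≤ 2 ↔ (t.any (fun f => PySem.Set.contains INVALID_FLAGS f) = true ∨
                   t.any (fun f => PySem.Set.contains HOLD_FLAGS f) = true ∨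
                   t.any (fun f => PySem.Set.contains QUALIFY_FLAGS f) = true) := by
  induction t with
  | nil => simp [pvMin]
  | cons f r ih =>
    have h := pvTier_eq f
    simp only [pvMin, List.any_cons, Bool.or_eq_true, ← ih]
    split_ifs at h <;> simp_all

-- ===== VERDICT (by name: the statement is the Claim_ definition above) =====
theorem derive_verdict_spec : Claim_equal_derive_verdict := by
  intro flags _
  unfold Spec_derive_verdict derive_verdict derive_verdict_alt
  rw [pvFold_min flags 3 le_rfl]
  have hr := pvMin_range flags
  have h0 := pvMin_le0 flags
  have h1 := pvMin_le1 flags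
  have h2 := pvMin_le2 flags
  have hmin : min (3 : Int) (pvMin flags) = pvMin flags := by omega
  rw [hmin]
  by_cases a0 : flags.any (fun f => PySem.Set.contains INVALID_FLAGS f) = true
  · have l0 := h0.mpr a0
    have hv : pvMin flags = 0 := by omega
    rw [if_pos a0, hv]; rfl
  · have n0 : ¬ pvMin flags ≤ 0 := fun h => a0 (h0.mp h)
    rw [if_neg a0]
    by_cases a1 : flags.any (fun f => PySem.Set.contains HOLD_FLAGS f) = true
    · have l1 := h1.mpr (Or.inr a1)
      have hv : pvMin flags = 1 := by omega
      rw [if_pos a1, hv]; rfl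
    · have n1 : ¬ pvMin flags ≤ 1 := fun h => (h1.mp h).elim a0 a1
      rw [if_neg a1]
      by_cases a2 : flags.any (fun f => PySem.Set.contains QUALIFY_FLAGS f) = true
      · have l2 := h2.mpr (Or.inr (Or.inr a2))
        have hv : pvMin flags = 2 := by omega
        rw [if_pos a2, hv]; rfl
      · have n2 : ¬ pvMin flags ≤ 2 := fun h => (h2.mp h).elim a0 (fun h' => h'.elim a1 a2)
        rw [if_neg a2]
        have hv : pvMin flags = 3 := by omega
        rw [hv]; rfl
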